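-- pv_equiv track=rewrite | github.com/thesophiaxu/contextd | scripts/mental-map.py | group_summaries
-- ===== SOURCE A (Python) =====
-- from collections import defaultdict
--
-- def group_summaries(summaries: list[dict]) -> str:
--     """Group summaries by app into a formatted text block for the LLM."""
--     by_app: dict[str, list[str]] = defaultdict(list)
--     timestamps: list[str] = []
--     for s in summaries:
--         ts = s.get("timestamp", s.get("created_at", ""))
--         app = s.get("app", s.get("application", "unknown"))
--         text = s.get("summary", s.get("text", ""))
--         if not text:
--             continue
--         if ts:
--             timestamps.append(ts)
--         by_app[app].append(f"  [{ts}] {text}" if ts else f"  {text}")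
--     if not by_app:
--         return ""
--     lines: list[str] = []
--     if timestamps:
--         lines.append(f"Time range: {timestamps[-1]} to {timestamps[0]}\n")
--     for app, entries in sorted(by_app.items()):
--         lines.append(f"### {app} ({len(entries)} entries)")
--         lines.extend(entries)
--         lines.append("")
--     return "\n".join(lines)
-- ===== SOURCE B (Python) =====
-- def group_summaries(summaries: list[dict]) -> str:
--     """Group summaries by app into a formatted text block for the LLM."""
--     def field(s, k1, k2, default):
--         return s.get(k1, s.get(k2, default))
--     kept = [s for s in summaries if field(s, "summary", "text", "")]
--     if not kept:
--         return ""
--     stamps = [field(s, "timestamp", "created_at", "") for s in kept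
--               if field(s, "timestamp", "created_at", "")]
--     header = f"Time range: {stamps[-1]} to {stamps[0]}\n\n" if stamps else ""
--
--     def block(app):
--         rows = []
--         for s in kept:
--             if field(s, "app", "application", "unknown") == app:
--                 ts = field(s, "timestamp", "created_at", "")
--                 text = field(s, "summary", "text", "")
--                 rows.append(f"  [{ts}] {text}" if ts else f"  {text}")
--         return f"### {app} ({len(rows)} entries)\n" + "\n".join(rows) + "\n"
--
--     apps = sorted(set(field(s, "app", "application", "unknown") for s in kept))
--     return header + "\n".join(block(a) for a in apps)
-- ===== Notes on version B (the rewrite author's own statement) =====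
-- stated objective: alternative
-- what changed: B drops A's dict-accumulating fold entirely: it stages the work as a filter of the kept summaries, a comprehension for the timestamps, a sort of the distinct app names alone, and renders each app's block as one string by re-scanning the kept list, instead of A's single loop that grows a defaultdict and then sorts its (app, entries) items and flattens them into a line list.
import Mathlib
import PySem

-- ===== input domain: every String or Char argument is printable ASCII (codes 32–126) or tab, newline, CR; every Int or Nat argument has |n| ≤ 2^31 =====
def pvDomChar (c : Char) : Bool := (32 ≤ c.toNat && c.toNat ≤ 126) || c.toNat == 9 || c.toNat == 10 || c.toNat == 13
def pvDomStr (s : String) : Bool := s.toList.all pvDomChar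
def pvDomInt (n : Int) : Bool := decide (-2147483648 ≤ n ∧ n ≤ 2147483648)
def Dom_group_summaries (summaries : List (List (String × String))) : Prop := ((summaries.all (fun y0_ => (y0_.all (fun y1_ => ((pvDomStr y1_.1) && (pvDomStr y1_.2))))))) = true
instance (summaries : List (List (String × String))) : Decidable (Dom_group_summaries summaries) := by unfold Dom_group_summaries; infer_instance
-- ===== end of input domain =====

-- B replaces A's dict-accumulating single fold and sort of (app, entries) items by staged
-- passes: filter the kept summaries, take the time range, sort the distinct app names alone,
-- and render each app's block as one string by re-scanning the kept list (objective:
-- alternative — same output, a different decomposition, no grouping dictionary).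

-- A-side helpers: the s.get(...) chains and the entry formatting of A's loop
def pvTs (s : List (String × String)) : String :=
  PySem.Dict.getD ⟨s⟩ "timestamp" (PySem.Dict.getD ⟨s⟩ "created_at" "")

def pvApp (s : List (String × String)) : String :=
  PySem.Dict.getD ⟨s⟩ "app" (PySem.Dict.getD ⟨s⟩ "application" "unknown")

def pvText (s : List (String × String)) : String :=
  PySem.Dict.getD ⟨s⟩ "summary" (PySem.Dict.getD ⟨s⟩ "text" "")

def pvLine (ts text : String) : String :=
  if ts ≠ "" then "  [" ++ ts ++ "] " ++ text else "  " ++ text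

-- ===== PORT A =====
def group_summaries (summaries : List (List (String × String))) : String :=
  let st := summaries.foldl
    (fun (st : PySem.Dict String (List String) × List String) s =>
      let ts := pvTs s
      let app := pvApp s
      let text := pvText s
      if text = "" then st
      else
        (st.1.insert app (st.1.getD app [] ++ [pvLine ts text]),
         if ts ≠ "" then st.2 ++ [ts] else st.2))
    (⟨[]⟩, [])
  let byApp := st.1
  let timestamps := st.2
  if byApp.items = [] then ""
  else
    let lines : List String :=
      if timestamps ≠ [] then
        ["Time range: " ++ PySem.List.pyGetD timestamps (-1) "" ++ " to " ++
          PySem.List.pyGetD timestamps 0 "" ++ "\n"]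
      else []
    let lines := (PySem.List.sorted2 byApp.items Prod.fst Prod.snd).foldl
      (fun acc p =>
        acc ++ ["### " ++ p.1 ++ " (" ++ PySem.Int.toStr (p.2.length : Int) ++ " entries)"]
          ++ p.2 ++ [""])
      lines
    PySem.Str.join "\n" lines

-- ===== PORT B =====
-- B's single field helper: field(s, k1, k2, default) = s.get(k1, s.get(k2, default))
def bGet (s : List (String × String)) (k1 k2 d : String) : String :=
  PySem.Dict.getD ⟨s⟩ k1 (PySem.Dict.getD ⟨s⟩ k2 d)

def group_summaries_alt (summaries : List (List (String × String))) : String :=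
  let kept := summaries.filter (fun s => bGet s "summary" "text" "" ≠ "")
  if kept = [] then ""
  else
    let stamps := (kept.filter (fun s => bGet s "timestamp" "created_at" "" ≠ "")).map
      (fun s => bGet s "timestamp" "created_at" "")
    let header :=
      if stamps = [] then "" else
        "Time range: " ++ PySem.List.pyGetD stamps (-1) "" ++ " to " ++
          PySem.List.pyGetD stamps 0 "" ++ "\n\n"
    let block := fun (app : String) =>
      let rows := (kept.filter (fun s => bGet s "app" "application" "unknown" = app)).map
        (fun s =>
          let ts := bGet s "timestamp" "created_at" ""
          let text := bGet s "summary" "text" ""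
          if ts ≠ "" then "  [" ++ ts ++ "] " ++ text else "  " ++ text)
      "### " ++ app ++ " (" ++ PySem.Int.toStr (rows.length : Int) ++ " entries)\n" ++
        PySem.Str.join "\n" rows ++ "\n"
    let apps := PySem.List.sorted
      (PySem.List.dedup (kept.map (fun s => bGet s "app" "application" "unknown")))
      (fun k => k)
    header ++ PySem.Str.join "\n" (apps.map block)

-- ===== PRECONDITION & SPEC =====
def Spec_group_summaries (summaries : List (List (String × String))) (out : String) : Prop := out = group_summaries_alt summaries
instance (summaries : List (List (String × String))) (out : String) : Decidable (Spec_group_summaries summaries out) := by unfold Spec_group_summaries; infer_instance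

-- ===== CLAIM (what is proved, stated in full; the proofs are below) =====
def Claim_equal_group_summaries : Prop := ∀ (summaries : List (List (String × String))), Dom_group_summaries summaries → Spec_group_summaries summaries (group_summaries summaries)

-- ===== LEMMAS AND PROOFS =====

-- the entries of the input that A keeps, and what it records for each
def keptOf (l : List (List (String × String))) : List (List (String × String)) :=
  l.filter (fun s => pvText s ≠ "")

def pairsOf (l : List (List (String × String))) : List (String × String) :=
  (keptOf l).map (fun s => (pvApp s, pvLine (pvTs s) (pvText s)))

def tssOf (l : List (List (String × String))) : List String :=
  ((keptOf l).filter (fun s => pvTs s ≠ "")).map pvTs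

def gstep (d : PySem.Dict String (List String)) (p : String × String) :
    PySem.Dict String (List String) :=
  d.insert p.1 (d.getD p.1 [] ++ [p.2])

def groupOf (ps : List (String × String)) (k : String) : List String :=
  (ps.filter (fun p => p.1 == k)).map Prod.snd

-- A's loop state, componentwise
lemma foldA (l : List (List (String × String))) :
    ∀ (d : PySem.Dict String (List String)) (t : List String),
      l.foldl
        (fun (st : PySem.Dict String (List String) × List String) s =>
          let ts := pvTs s
          let app := pvApp s
          let text := pvText s
          if text = "" then st
          else
            (st.1.insert app (st.1.getD app [] ++ [pvLine ts text]),
             if ts ≠ "" then st.2 ++ [ts] else st.2))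
        (d, t)
      = ((pairsOf l).foldl gstep d, t ++ tssOf l) := by
  induction l with
  | nil => intro d t; simp [pairsOf, keptOf, tssOf]
  | cons s l ih =>
    intro d t
    rw [List.foldl_cons]
    by_cases hx : pvText s = ""
    · rw [show (let ts := pvTs s; let app := pvApp s; let text := pvText s;
          if text = "" then ((d, t) : PySem.Dict String (List String) × List String)
          else ((d, t).1.insert app ((d, t).1.getD app [] ++ [pvLine ts text]),
            if ts ≠ "" then (d, t).2 ++ [ts] else (d, t).2)) = (d, t) from by simp [hx]]
      rw [ih]
      simp [pairsOf, keptOf, tssOf, hx]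
    · by_cases hts : pvTs s = ""
      · rw [show (let ts := pvTs s; let app := pvApp s; let text := pvText s;
            if text = "" then ((d, t) : PySem.Dict String (List String) × List String)
            else ((d, t).1.insert app ((d, t).1.getD app [] ++ [pvLine ts text]),
              if ts ≠ "" then (d, t).2 ++ [ts] else (d, t).2))
            = (d.insert (pvApp s) (d.getD (pvApp s) [] ++ [pvLine (pvTs s) (pvText s)]), t)
            from by simp [hx, hts]]
        rw [ih]
        simp [pairsOf, keptOf, tssOf, hx, hts, gstep]
      · rw [show (let ts := pvTs s; let app := pvApp s; let text := pvText s;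
            if text = "" then ((d, t) : PySem.Dict String (List String) × List String)
            else ((d, t).1.insert app ((d, t).1.getD app [] ++ [pvLine ts text]),
              if ts ≠ "" then (d, t).2 ++ [ts] else (d, t).2))
            = (d.insert (pvApp s) (d.getD (pvApp s) [] ++ [pvLine (pvTs s) (pvText s)]),
               t ++ [pvTs s]) from by simp [hx, hts]]
        rw [ih]
        simp [pairsOf, keptOf, tssOf, hx, hts, gstep]

lemma find?_map_keys (ks : List String) (g : String → List String) (a : String) :
    List.find? (fun q => q.1 == a) (ks.map (fun k => (k, g k)))
      = if a ∈ ks then some (a, g a) else none := by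
  induction ks with
  | nil => simp
  | cons k ks ih =>
    by_cases h : k = a
    · subst h; simp
    · simp [h, Ne.symm h, ih]

-- the grouping dictionary A builds, characterised
lemma groupFold (ps : List (String × String)) :
    (ps.foldl gstep (⟨[]⟩ : PySem.Dict String (List String))).items
      = (PySem.List.dedup (ps.map Prod.fst)).map (fun k => (k, groupOf ps k)) := by
  induction ps using List.reverseRecOn with
  | nil => simp [PySem.List.dedup, PySem.Set.ofList, PySem.Set.empty, groupOf]
  | append_singleton ps p ih =>
    rw [List.foldl_append]
    simp only [List.foldl_cons, List.foldl_nil]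
    set ks := PySem.List.dedup (ps.map Prod.fst) with hks
    have hnew : PySem.List.dedup ((ps ++ [p]).map Prod.fst)
        = if p.1 ∈ ks then ks else ks ++ [p.1] := by
      simp only [PySem.List.dedup, PySem.Set.ofList, List.map_append, List.foldl_append,
        List.foldl_cons, List.foldl_nil]
      rw [hks]
      simp only [PySem.List.dedup, PySem.Set.ofList] at *
      by_cases h : p.1 ∈ List.foldl PySem.Set.add PySem.Set.empty (ps.map Prod.fst) <;>
        simp [PySem.Set.add, PySem.Set.contains, h]
    have hgrp : ∀ k, groupOf (ps ++ [p]) k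
        = groupOf ps k ++ (if p.1 = k then [p.2] else []) := by
      intro k
      by_cases h : p.1 = k <;> simp [groupOf, List.filter_append, List.filter_cons, h]
    have hget : (ps.foldl gstep (⟨[]⟩ : PySem.Dict String (List String))).get? p.1
        = if p.1 ∈ ks then some (groupOf ps p.1) else none := by
      simp only [PySem.Dict.get?, ih, find?_map_keys]
      by_cases h : p.1 ∈ ks <;> simp [h]
    have hcont : (ps.foldl gstep (⟨[]⟩ : PySem.Dict String (List String))).contains p.1
        = decide (p.1 ∈ ks) := by
      simp only [PySem.Dict.contains, ih, List.any_map, Function.comp]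
      by_cases h : p.1 ∈ ks
      · simp only [h, decide_true, List.any_eq_true]
        exact ⟨p.1, h, by simp⟩
      · simp only [h, decide_false, List.any_eq_false]
        intro k hk
        simp only [Function.comp_apply, beq_iff_eq]
        exact fun he => h (he ▸ hk)
    by_cases hmem : p.1 ∈ ks
    · rw [hnew]; simp only [hmem, if_true]
      simp only [gstep, PySem.Dict.insert, hcont, hmem, decide_true, if_true,
        PySem.Dict.getD, hget, Option.getD_some, ih]
      simp only [List.map_map]
      refine List.map_congr_left ?_
      intro k hk
      simp only [Function.comp]
      by_cases h : k = p.1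
      · subst h; simp [hgrp]
      · have : (k == p.1) = false := by simp [h]
        simp [this, hgrp]
        exact fun he => h he.symm
    · rw [hnew]; simp only [hmem, if_false]
      simp only [gstep, PySem.Dict.insert, hcont, hmem, decide_false,
        Bool.false_eq_true, if_false, PySem.Dict.getD, hget, Option.getD_none, ih]
      rw [List.map_append]
      congr 1
      · refine List.map_congr_left ?_
        intro k hk
        have hne : p.1 ≠ k := fun he => hmem (he ▸ hk)
        simp [hgrp, hne]
      · have hnin : p.1 ∉ ps.map Prod.fst := by
          intro h
          exact hmem (by simpa [hks, PySem.List.dedup, PySem.Set.mem_ofList] using h)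
        have : groupOf ps p.1 = [] := by
          simp only [groupOf, List.map_eq_nil_iff, List.filter_eq_nil_iff]
          intro q hq
          simp only [beq_iff_eq]
          intro he
          exact hnin (he ▸ List.mem_map_of_mem hq)
        simp [hgrp, this]

lemma insertBy_congr {α : Type} (f g : α → α → Bool) (x : α) :
    ∀ ys : List α, (∀ y ∈ ys, f x y = g x y) →
      PySem.List.insertBy f x ys = PySem.List.insertBy g x ys := by
  intro ys
  induction ys with
  | nil => intro _; rfl
  | cons y ys ih =>
    intro h
    simp only [PySem.List.insertBy]
    rw [h y (by simp)]
    by_cases hb : g x y = true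
    · simp [hb]
    · simp only [hb, if_false]
      have := ih (fun z hz => h z (by simp [hz]))
      simp only [PySem.List.insertBy] at this
      rw [this]

lemma foldl_insertBy_congr {α : Type} (S : List α) (f g : α → α → Bool)
    (h : ∀ a ∈ S, ∀ b ∈ S, f a b = g a b) :
    ∀ (l acc : List α), (∀ x ∈ l, x ∈ S) → (∀ x ∈ acc, x ∈ S) →
      l.foldl (fun acc x => PySem.List.insertBy f x acc) acc
        = l.foldl (fun acc x => PySem.List.insertBy g x acc) acc := by
  intro l
  induction l with
  | nil => intros; rfl
  | cons x l ih =>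
    intro acc hl hacc
    simp only [List.foldl_cons]
    rw [insertBy_congr f g x acc (fun y hy => h x (hl x (by simp)) y (hacc y hy))]
    exact ih _ (fun z hz => hl z (by simp [hz]))
      (fun z hz => by
        rcases (PySem.List.mem_insertBy g x z acc).mp hz with h1 | h1
        · exact h1 ▸ hl x (by simp)
        · exact hacc z h1)

-- sorting the (key, value) items of the grouped dict = mapping the sorted keys
lemma sorted2_items (ks : List String) (g : String → List String) (hnd : ks.Nodup) :
    PySem.List.sorted2 (ks.map (fun k => (k, g k))) Prod.fst Prod.snd
      = (PySem.List.sorted ks (fun k => k)).map (fun k => (k, g k)) := by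
  have hself : ∀ a ∈ ks.map (fun k => (k, g k)), ∀ b ∈ ks.map (fun k => (k, g k)),
      (decide (a.1 < b.1) || (!decide (b.1 < a.1) && decide (a.2 < b.2)))
        = decide (a.1 < b.1) := by
    rintro a ha b hb
    rcases List.mem_map.mp ha with ⟨ka, hka, rfl⟩
    rcases List.mem_map.mp hb with ⟨kb, hkb, rfl⟩
    rcases lt_trichotomy ka kb with h | h | h
    · simp [h]
    · subst h; simp
    · simp [h, not_lt_of_gt h]
  have h1 : PySem.List.sorted2 (ks.map (fun k => (k, g k))) Prod.fst Prod.snd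
      = PySem.List.sorted (ks.map (fun k => (k, g k))) Prod.fst := by
    rw [PySem.List.sorted_eq_foldl_insertBy]
    simp only [PySem.List.sorted2]
    exact foldl_insertBy_congr _ _ _ hself _ [] (fun x hx => hx) (by simp)
  rw [h1]
  apply PySem.List.sorted_eq_of_perm_of_pairwise_lt
  · exact (PySem.List.sorted_perm ks (fun k => k) false).map _
  · rw [List.pairwise_map]
    have hle := PySem.List.sorted_pairwise ks (fun k => k)
    have hnd' : (PySem.List.sorted ks (fun k => k)).Nodup :=
      (PySem.List.sorted_perm ks (fun k => k) false).nodup_iff.mpr hnd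
    have := hle.and hnd'
    exact this.imp (fun {a b} h => lt_of_le_of_ne h.1 h.2)

lemma dedup_eq_nil_iff (xs : List String) : PySem.List.dedup xs = [] ↔ xs = [] := by
  constructor
  · intro h
    cases xs with
    | nil => rfl
    | cons x t =>
      have : x ∈ PySem.List.dedup (x :: t) := by
        simp [PySem.List.dedup, PySem.Set.mem_ofList]
      rw [h] at this
      exact absurd this (List.not_mem_nil)
  · intro h; subst h; rfl

-- join algebra, at the List Char level first
lemma cjoin_cons_ne (sep p : List Char) (rest : List (List Char)) (h : rest ≠ []) :
    PySem.Chars.join sep (p :: rest) = p ++ sep ++ PySem.Chars.join sep rest := by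
  cases rest with
  | nil => exact absurd rfl h
  | cons q r => exact PySem.Chars.join_cons_cons sep p q r

lemma cjoin_singleton (sep x : List Char) : PySem.Chars.join sep [x] = x := by
  simp [PySem.Chars.join, List.intercalate]

lemma cjoin_append (sep : List Char) (X Y : List (List Char)) (hX : X ≠ []) (hY : Y ≠ []) :
    PySem.Chars.join sep (X ++ Y) = PySem.Chars.join sep X ++ sep ++ PySem.Chars.join sep Y := by
  induction X with
  | nil => exact absurd rfl hX
  | cons x X ih =>
    cases X with
    | nil => rw [List.singleton_append, cjoin_cons_ne sep x Y hY, cjoin_singleton]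
    | cons x' X' =>
      rw [List.cons_append, cjoin_cons_ne sep x _ (by simp),
        cjoin_cons_ne sep x _ (by simp), ih (by simp)]
      simp [List.append_assoc]

-- the same facts lifted to strings
lemma sjoin_cons_ne (sep p : String) (rest : List String) (h : rest ≠ []) :
    PySem.Str.join sep (p :: rest) = p ++ sep ++ PySem.Str.join sep rest := by
  apply String.toList_inj.mp
  simp only [PySem.Str.toList_join, List.map_cons, String.toList_append]
  rw [cjoin_cons_ne _ _ _ (by simpa using h)]

lemma sjoin_append (sep : String) (X Y : List String) (hX : X ≠ []) (hY : Y ≠ []) :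
    PySem.Str.join sep (X ++ Y) = PySem.Str.join sep X ++ sep ++ PySem.Str.join sep Y := by
  apply String.toList_inj.mp
  simp only [PySem.Str.toList_join, List.map_append, String.toList_append]
  rw [cjoin_append _ _ _ (by simpa using hX) (by simpa using hY)]

lemma sjoin_singleton (sep x : String) : PySem.Str.join sep [x] = x := by
  apply String.toList_inj.mp
  simp [PySem.Str.toList_join, cjoin_singleton]

lemma sjoin_append_nil (r : List String) (hr : r ≠ []) :
    PySem.Str.join "\n" (r ++ [""]) = PySem.Str.join "\n" r ++ "\n" := by
  rw [sjoin_append "\n" r [""] hr (by simp), sjoin_singleton]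
  apply String.toList_inj.mp
  simp

-- one app block: A's three-part line group joined = B's block string
lemma sjoin_block (h : String) (r : List String) (hr : r ≠ []) :
    PySem.Str.join "\n" (h :: (r ++ [""]))
      = h ++ "\n" ++ PySem.Str.join "\n" r ++ "\n" := by
  apply String.toList_inj.mp
  simp only [PySem.Str.toList_join, List.map_cons, List.map_append, String.toList_append]
  rw [cjoin_cons_ne _ _ _ (by simp), cjoin_append _ _ _ (by simpa using hr) (by simp)]
  simp

-- A's flattened per-app lines joined = B's per-app block strings joined
lemma joinBlocks (hdr : String → String) (rows : String → List String) :
    ∀ apps : List String, (∀ a ∈ apps, rows a ≠ []) →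
      PySem.Str.join "\n" (apps.flatMap (fun a => hdr a :: (rows a ++ [""])))
        = PySem.Str.join "\n"
            (apps.map (fun a => hdr a ++ "\n" ++ PySem.Str.join "\n" (rows a) ++ "\n")) := by
  intro apps
  induction apps with
  | nil => intro _; rfl
  | cons a rest ih =>
    intro h
    have hra : rows a ≠ [] := h a (by simp)
    rw [List.flatMap_cons, List.map_cons]
    cases rest with
    | nil =>
      simp only [List.flatMap_nil, List.map_nil, List.append_nil]
      rw [sjoin_block (hdr a) (rows a) hra, sjoin_singleton]
    | cons b rest' =>
      have hfm : (b :: rest').flatMap (fun a => hdr a :: (rows a ++ [""])) ≠ [] := by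
        simp [List.flatMap_cons]
      rw [List.cons_append,
        sjoin_cons_ne _ _ _ (by simp [List.flatMap_cons]),
        sjoin_append _ _ _ (by simpa using hra) hfm,
        sjoin_append_nil _ hra,
        ih (fun x hx => h x (by simp [hx])),
        sjoin_cons_ne _ _ _ (by simp)]
      apply String.toList_inj.mp
      simp

-- B's per-app row scan over the kept list = A's per-app group of recorded lines
lemma rowsBridge (l : List (List (String × String))) (a : String) :
    ((keptOf l).filter (fun s => pvApp s = a)).map
        (fun s => pvLine (pvTs s) (pvText s))
      = groupOf (pairsOf l) a := by
  simp only [groupOf, pairsOf, List.filter_map, List.map_map]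
  rfl

lemma groupOf_ne_nil (ps : List (String × String)) (a : String) (h : a ∈ ps.map Prod.fst) :
    groupOf ps a ≠ [] := by
  rcases List.mem_map.mp h with ⟨p, hp, rfl⟩
  simp only [groupOf, ne_eq, List.map_eq_nil_iff, List.filter_eq_nil_iff]
  intro hall
  exact hall p hp (by simp)

-- ===== VERDICT (by name: the statement is the Claim_ definition above) =====
theorem group_summaries_spec : Claim_equal_group_summaries := by
  intro summaries _
  unfold Spec_group_summaries group_summaries group_summaries_alt
  rw [foldA]
  simp only [List.nil_append]
  rw [groupFold]
  have hkept : summaries.filter (fun s => bGet s "summary" "text" "" ≠ "") = keptOf summaries := rfl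
  rw [hkept]
  set kept := keptOf summaries with hkeptdef
  set ps := pairsOf summaries with hps
  have hpsk : ps = kept.map (fun s => (pvApp s, pvLine (pvTs s) (pvText s))) := rfl
  set ks := PySem.List.dedup (ps.map Prod.fst) with hks
  have hnd : ks.Nodup := PySem.Set.nodup_ofList _
  rw [sorted2_items ks (fun k => groupOf ps k) hnd]
  have happs : PySem.List.dedup (kept.map (fun s => bGet s "app" "application" "unknown")) = ks := by
    rw [hks, hpsk]; simp [List.map_map]; rfl
  rw [happs]
  have hstamps : (kept.filter (fun s => bGet s "timestamp" "created_at" "" ≠ "")).map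
      (fun s => bGet s "timestamp" "created_at" "") = tssOf summaries := rfl
  rw [hstamps]
  have hr : ∀ a : String, (kept.filter (fun s => bGet s "app" "application" "unknown" = a)).map
      (fun s =>
        let ts := bGet s "timestamp" "created_at" ""
        let text := bGet s "summary" "text" ""
        if ts ≠ "" then "  [" ++ ts ++ "] " ++ text else "  " ++ text) = groupOf ps a := by
    intro a
    rw [← rowsBridge summaries a]
    rfl
  by_cases hempty : kept = []
  · have : ps = [] := by rw [hpsk, hempty]; rfl
    simp [hempty, this, hks, PySem.List.dedup, PySem.Set.ofList, PySem.Set.empty]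
  · have hps_ne : ps ≠ [] := by
      rw [hpsk]; simpa using hempty
    have hks_ne : ks ≠ [] := fun h => hps_ne (by
      have := (dedup_eq_nil_iff (ps.map Prod.fst)).mp (hks ▸ h)
      simpa using this)
    have hmap_ne : ks.map (fun k => (k, groupOf ps k)) ≠ [] := by simp [hks_ne]
    rw [if_neg hmap_ne, if_neg hempty]
    set sks := PySem.List.sorted ks (fun k => k) with hsks
    have hsks_ne : sks ≠ [] := by
      rw [hsks]
      intro h
      exact hks_ne ((PySem.List.sorted_eq_nil_iff _ _ _).mp h)
    have hrows_ne : ∀ a ∈ sks, groupOf ps a ≠ [] := by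
      intro a ha
      apply groupOf_ne_nil
      have : a ∈ ks := (PySem.List.mem_sorted _ _ _ _).mp ha
      exact (PySem.Set.mem_ofList _ _).mp (by simpa [hks, PySem.List.dedup] using this)
    -- turn A's emit fold into a flatMap
    have hemit : ∀ (init : List String),
        (sks.map (fun k => (k, groupOf ps k))).foldl
          (fun acc p =>
            acc ++ ["### " ++ p.1 ++ " (" ++ PySem.Int.toStr (p.2.length : Int) ++ " entries)"]
              ++ p.2 ++ [""])
          init
        = init ++ sks.flatMap (fun a =>
            ("### " ++ a ++ " (" ++ PySem.Int.toStr ((groupOf ps a).length : Int) ++ " entries)")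
              :: (groupOf ps a ++ [""])) := by
      intro init
      rw [show (fun (acc : List String) (p : String × List String) =>
            acc ++ ["### " ++ p.1 ++ " (" ++ PySem.Int.toStr (p.2.length : Int) ++ " entries)"]
              ++ p.2 ++ [""])
          = (fun acc p =>
            acc ++ (("### " ++ p.1 ++ " (" ++ PySem.Int.toStr (p.2.length : Int) ++ " entries)")
              :: (p.2 ++ [""]))) from by
        funext acc p; simp]
      rw [PySem.List.foldl_append_eq_flatMap]
      congr 1
      rw [List.flatMap_map]
    by_cases htss : tssOf summaries = []
    · rw [if_pos htss]
      simp only [htss, ne_eq, not_true_eq_false, if_false]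
      rw [hemit, List.nil_append]
      rw [joinBlocks
        (fun a => "### " ++ a ++ " (" ++ PySem.Int.toStr ((groupOf ps a).length : Int) ++ " entries)")
        (fun a => groupOf ps a) sks hrows_ne]
      simp only [hr]
      apply String.toList_inj.mp
      simp only [PySem.Str.toList_join, String.toList_append, List.map_map]
      simp only [show ("".toList : List Char) = [] from rfl, List.nil_append]
      congr 1
      apply List.map_congr_left
      intro a _
      simp only [Function.comp_apply, String.toList_append]
      simp
    · rw [if_neg htss]
      simp only [ne_eq, htss, not_false_eq_true, if_true]
      rw [hemit]
      have hfm_ne : sks.flatMap (fun a =>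
          ("### " ++ a ++ " (" ++ PySem.Int.toStr ((groupOf ps a).length : Int) ++ " entries)")
            :: (groupOf ps a ++ [""])) ≠ [] := by
        rcases List.exists_cons_of_ne_nil hsks_ne with ⟨b, r, hbr⟩
        rw [hbr]
        simp [List.flatMap_cons]
      rw [List.singleton_append, sjoin_cons_ne _ _ _ hfm_ne]
      rw [joinBlocks
        (fun a => "### " ++ a ++ " (" ++ PySem.Int.toStr ((groupOf ps a).length : Int) ++ " entries)")
        (fun a => groupOf ps a) sks hrows_ne]
      simp only [hr]
      apply String.toList_inj.mp
      simp only [PySem.Str.toList_join, String.toList_append, List.map_map]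
      have hmapeq : List.map (String.toList ∘ fun a =>
            ("### " ++ a ++ " (" ++ PySem.Int.toStr ((groupOf ps a).length : Int) ++ " entries)")
              ++ "\n" ++ PySem.Str.join "\n" (groupOf ps a) ++ "\n") sks
          = List.map (String.toList ∘ fun app =>
            "### " ++ app ++ " (" ++ PySem.Int.toStr ((groupOf ps app).length : Int) ++ " entries)\n"
              ++ PySem.Str.join "\n" (groupOf ps app) ++ "\n") sks := by
        apply List.map_congr_left
        intro a _
        simp only [Function.comp_apply, String.toList_append]
        simp
      rw [hmapeq]
      simp
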